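-- pv_equiv track=rewrite | github.com/zhenyulin/deep-learning-nlp-practicals | src/lib/data.py | drop_data_of_label
-- ===== SOURCE A (Python) =====
-- def drop_data_of_label(dataset, target, drop_number):
--     output = []
--     counter = 0
--     for entry in dataset:
--         if entry[1] == target and counter < drop_number:
--             counter += 1
--         else:
--             output.append(entry)
--     return output
-- ===== SOURCE B (Python) =====
-- def drop_data_of_label(dataset, target, drop_number):
--     drop_set = set()
--     counter = 0
--     for i, entry in enumerate(dataset):
--         if entry[1] == target and counter < drop_number:
--             drop_set.add(i)
--             counter += 1
--     return [entry for i, entry in enumerate(dataset) if i not in drop_set]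
-- ===== Notes on version B (the rewrite author's own statement) =====
-- stated objective: alternative
-- what changed: B separates the work into two passes: a first enumerate pass that records in a set the indices of the first drop_number entries with the target label, and a second pass that rebuilds the list by index-filtering against that set, instead of A's single pass with a running counter appended to an output accumulator.
import Mathlib
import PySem

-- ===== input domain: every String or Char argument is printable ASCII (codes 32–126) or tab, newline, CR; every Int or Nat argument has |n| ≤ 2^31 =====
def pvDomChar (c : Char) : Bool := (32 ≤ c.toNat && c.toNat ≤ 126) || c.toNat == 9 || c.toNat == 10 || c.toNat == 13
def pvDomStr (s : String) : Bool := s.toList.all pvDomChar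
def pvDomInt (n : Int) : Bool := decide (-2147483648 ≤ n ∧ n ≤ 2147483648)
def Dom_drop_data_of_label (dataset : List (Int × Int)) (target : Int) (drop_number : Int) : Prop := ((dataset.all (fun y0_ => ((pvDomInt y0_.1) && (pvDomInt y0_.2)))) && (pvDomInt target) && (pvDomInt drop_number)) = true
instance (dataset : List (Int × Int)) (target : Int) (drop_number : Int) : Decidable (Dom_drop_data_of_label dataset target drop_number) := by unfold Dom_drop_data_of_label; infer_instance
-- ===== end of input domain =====

-- B does the same job in two passes (collect drop indices, then index-filter); same O(n) cost, different decomposition.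

-- ===== PORT A =====
-- single pass: output accumulator + running counter, as in A's for-loop body
def pvStepA (target drop_number : Int) (st : List (Int × Int) × Int) (entry : Int × Int) :
    List (Int × Int) × Int :=
  if entry.2 == target && decide (st.2 < drop_number) then (st.1, st.2 + 1)
  else (st.1 ++ [entry], st.2)

def drop_data_of_label (dataset : List (Int × Int)) (target : Int) (drop_number : Int) : List (Int × Int) :=
  (dataset.foldl (pvStepA target drop_number) ([], 0)).1

-- ===== PORT B =====
-- first pass of Source B: 'for i, entry in enumerate(dataset)', collecting drop indices into a set
def pvCollectDrops (l : List (Int × Int)) (target drop_number : Int) (i : Nat) (counter : Int)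
    (s : PySem.Set Nat) : PySem.Set Nat :=
  match l with
  | [] => s
  | entry :: rest =>
    if entry.2 == target && decide (counter < drop_number) then
      pvCollectDrops rest target drop_number (i + 1) (counter + 1) (PySem.Set.add s i)
    else
      pvCollectDrops rest target drop_number (i + 1) counter s

-- second pass of Source B: '[entry for i, entry in enumerate(dataset) if i not in drop_set]'
def pvBuildOut (l : List (Int × Int)) (i : Nat) (s : PySem.Set Nat) : List (Int × Int) :=
  match l with
  | [] => []
  | entry :: rest =>
    if PySem.Set.contains s i then pvBuildOut rest (i + 1) s
    else entry :: pvBuildOut rest (i + 1) s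

def drop_data_of_label_alt (dataset : List (Int × Int)) (target : Int) (drop_number : Int) : List (Int × Int) :=
  pvBuildOut dataset 0 (pvCollectDrops dataset target drop_number 0 0 PySem.Set.empty)

-- ===== PRECONDITION & SPEC =====
def Spec_drop_data_of_label (dataset : List (Int × Int)) (target : Int) (drop_number : Int) (out : List (Int × Int)) : Prop := out = drop_data_of_label_alt dataset target drop_number
instance (dataset : List (Int × Int)) (target : Int) (drop_number : Int) (out : List (Int × Int)) : Decidable (Spec_drop_data_of_label dataset target drop_number out) := by unfold Spec_drop_data_of_label; infer_instance

-- ===== CLAIM (what is proved, stated in full; the proofs are below) =====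
def Claim_equal_drop_data_of_label : Prop := ∀ (dataset : List (Int × Int)) (target : Int) (drop_number : Int), Dom_drop_data_of_label dataset target drop_number → Spec_drop_data_of_label dataset target drop_number (drop_data_of_label dataset target drop_number)

-- ===== LEMMAS AND PROOFS =====

-- reference recursion: what both programs compute
def pvSpecDrop (l : List (Int × Int)) (target drop_number counter : Int) : List (Int × Int) :=
  match l with
  | [] => []
  | entry :: rest =>
    if entry.2 == target && decide (counter < drop_number) then
      pvSpecDrop rest target drop_number (counter + 1)
    else entry :: pvSpecDrop rest target drop_number counter

-- A's foldl with accumulator equals acc ++ reference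
theorem pvA_eq_spec (l : List (Int × Int)) (t n : Int) :
    ∀ (acc : List (Int × Int)) (c : Int),
      (l.foldl (pvStepA t n) (acc, c)).1 = acc ++ pvSpecDrop l t n c := by
  induction l with
  | nil => intro acc c; simp [pvSpecDrop]
  | cons e r ih =>
    intro acc c
    simp only [List.foldl_cons, pvStepA, pvSpecDrop]
    by_cases h : (e.2 == t && decide (c < n)) = true
    · rw [if_pos h, if_pos h, ih]
    · rw [if_neg h, if_neg h, ih]; simp

-- membership in the collected drop set: old members persist, new indices are ≥ the start index
theorem pvMem_collect (l : List (Int × Int)) (t n : Int) :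
    ∀ (i : Nat) (c : Int) (s : PySem.Set Nat) (j : Nat),
      j ∈ pvCollectDrops l t n i c s → j ∈ s ∨ i ≤ j := by
  induction l with
  | nil => intro i c s j h; exact Or.inl h
  | cons e r ih =>
    intro i c s j h
    simp only [pvCollectDrops] at h
    by_cases hc : (e.2 == t && decide (c < n)) = true
    · rw [if_pos hc] at h
      rcases ih (i + 1) (c + 1) (PySem.Set.add s i) j h with h' | h'
      · rcases (PySem.Set.mem_add _ _ _).1 h' with h'' | h''
        · exact Or.inl h''
        · exact Or.inr (le_of_eq h''.symm)
      · exact Or.inr (by omega)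
    · rw [if_neg hc] at h
      rcases ih (i + 1) c s j h with h' | h'
      · exact Or.inl h'
      · exact Or.inr (by omega)

-- members of the starting set persist through collection
theorem pvMem_collect_of_mem (l : List (Int × Int)) (t n : Int) :
    ∀ (i : Nat) (c : Int) (s : PySem.Set Nat) (j : Nat),
      j ∈ s → j ∈ pvCollectDrops l t n i c s := by
  induction l with
  | nil => intro i c s j h; exact h
  | cons e r ih =>
    intro i c s j h
    simp only [pvCollectDrops]
    by_cases hc : (e.2 == t && decide (c < n)) = true
    · rw [if_pos hc]
      exact ih (i + 1) (c + 1) _ j ((PySem.Set.mem_add _ _ _).2 (Or.inl h))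
    · rw [if_neg hc]; exact ih (i + 1) c s j h

-- core: building the output against the collected set yields the reference recursion
theorem pvB_eq_spec (l : List (Int × Int)) (t n : Int) :
    ∀ (i : Nat) (c : Int) (s : PySem.Set Nat),
      (∀ j ∈ s, j < i) →
      pvBuildOut l i (pvCollectDrops l t n i c s) = pvSpecDrop l t n c := by
  induction l with
  | nil => intro i c s _; rfl
  | cons e r ih =>
    intro i c s hs
    simp only [pvCollectDrops, pvSpecDrop, pvBuildOut]
    by_cases hc : (e.2 == t && decide (c < n)) = true
    · rw [if_pos hc, if_pos hc]
      have hmem : i ∈ pvCollectDrops r t n (i + 1) (c + 1) (PySem.Set.add s i) :=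
        pvMem_collect_of_mem r t n (i + 1) (c + 1) _ i ((PySem.Set.mem_add _ _ _).2 (Or.inr rfl))
      rw [if_pos ((PySem.Set.contains_iff _ _).2 hmem)]
      exact ih (i + 1) (c + 1) (PySem.Set.add s i)
        (fun j hj => by rcases (PySem.Set.mem_add _ _ _).1 hj with h | h
                        · exact Nat.lt_succ_of_lt (hs j h)
                        · omega)
    · rw [if_neg hc, if_neg hc]
      have hnot : i ∉ pvCollectDrops r t n (i + 1) c s := by
        intro h
        rcases pvMem_collect r t n (i + 1) c s i h with h' | h'
        · exact absurd (hs i h') (lt_irrefl i)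
        · omega
      rw [if_neg (by simpa [PySem.Set.contains_iff] using hnot)]
      exact congrArg (e :: ·) (ih (i + 1) c s (fun j hj => Nat.lt_succ_of_lt (hs j hj)))

-- ===== VERDICT (by name: the statement is the Claim_ definition above) =====
theorem drop_data_of_label_spec : Claim_equal_drop_data_of_label := by
  intro dataset target drop_number _
  show drop_data_of_label dataset target drop_number = drop_data_of_label_alt dataset target drop_number
  rw [drop_data_of_label, drop_data_of_label_alt,
      pvA_eq_spec dataset target drop_number [] 0,
      pvB_eq_spec dataset target drop_number 0 0 PySem.Set.empty (by intro j hj; cases hj)]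
  rfl
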